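-- pv_equiv track=rewrite | github.com/Hellfire01/discord_translator | src/instructions/instructions/instruction_list.py | __present_keywords
-- ===== SOURCE A (Python) =====
-- def __present_keywords(keywords) -> str:
--     ret = ""
--     index = 0
--     while index < len(keywords):
--         ret += '`' + keywords[index] + '`'
--         if index < len(keywords) - 2:
--             ret += ", "
--         elif index < len(keywords) - 1:
--             ret += " or "
--         index += 1
--     return ret
-- ===== SOURCE B (Python) =====
-- def __present_keywords(keywords) -> str:
--     wrapped = ['`' + k + '`' for k in keywords]
--     if not wrapped:
--         return ""
--     if len(wrapped) == 1:
--         return wrapped[0]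
--     return ", ".join(wrapped[:-1]) + " or " + wrapped[-1]
-- ===== Notes on version B (the rewrite author's own statement) =====
-- stated objective: simpler
-- what changed: Replaces the index-counting while loop that grows the result by repeated += with per-index separator branches by wrap-all-then-join: a comprehension builds the backtick-wrapped list and the result is ", ".join(wrapped[:-1]) + " or " + wrapped[-1] with trivial empty/singleton guards; join avoids the quadratic copying of repeated string concatenation.
import Mathlib
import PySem

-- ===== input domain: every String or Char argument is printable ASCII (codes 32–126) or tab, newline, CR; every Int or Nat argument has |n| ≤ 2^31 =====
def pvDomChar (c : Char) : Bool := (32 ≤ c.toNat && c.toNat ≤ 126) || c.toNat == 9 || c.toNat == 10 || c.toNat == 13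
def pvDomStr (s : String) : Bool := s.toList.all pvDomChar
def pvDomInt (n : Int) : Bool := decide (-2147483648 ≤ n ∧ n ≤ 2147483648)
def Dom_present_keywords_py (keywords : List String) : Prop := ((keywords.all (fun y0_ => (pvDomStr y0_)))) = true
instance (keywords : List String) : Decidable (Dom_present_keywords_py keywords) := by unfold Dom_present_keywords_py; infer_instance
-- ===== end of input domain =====

-- B replaces A's index-counting while loop (separator chosen by per-index branches) with
-- wrap-all-then-join assembly; objective: simpler. Equivalence of return values is proved below.

-- ===== PORT A =====
-- while loop of A: state (index, ret); keywords[index] is always in range since 0 ≤ index < len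
def presentLoopA (keywords : List String) (index : Nat) (ret : String) : String :=
  if h : index < keywords.length then
    let ret1 := ret ++ ("`" ++ keywords[index] ++ "`")
    let ret2 :=
      if (index : Int) < (keywords.length : Int) - 2 then ret1 ++ ", "
      else if (index : Int) < (keywords.length : Int) - 1 then ret1 ++ " or "
      else ret1
    presentLoopA keywords (index + 1) ret2
  else ret
termination_by keywords.length - index

def present_keywords_py (keywords : List String) : String :=
  presentLoopA keywords 0 ""

-- ===== PORT B =====
-- hand port of ", ".join on a list of strings (Source B's join call)
def joinCommaB : List String → String
  | [] => ""
  | [w] => w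
  | w :: ws => w ++ ", " ++ joinCommaB ws

def present_keywords_py_alt (keywords : List String) : String :=
  let wrapped := keywords.map (fun k => "`" ++ k ++ "`")
  match wrapped with
  | [] => ""
  | [w] => w
  | w :: ws => joinCommaB ((w :: ws).dropLast) ++ " or " ++ (w :: ws).getLast (by simp)

-- ===== PRECONDITION & SPEC =====
def Spec_present_keywords_py (keywords : List String) (out : String) : Prop := out = present_keywords_py_alt keywords
instance (keywords : List String) (out : String) : Decidable (Spec_present_keywords_py keywords out) := by unfold Spec_present_keywords_py; infer_instance

-- ===== CLAIM (what is proved, stated in full; the proofs are below) =====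
def Claim_equal_present_keywords_py : Prop := ∀ (keywords : List String), Dom_present_keywords_py keywords → Spec_present_keywords_py keywords (present_keywords_py keywords)

-- ===== LEMMAS AND PROOFS =====

-- functional characterisation of A's loop over the remaining suffix
def sepF (n : Nat) : String := if 2 ≤ n then ", " else if n = 1 then " or " else ""

def fA : List String → String
  | [] => ""
  | k :: rest => "`" ++ k ++ "`" ++ sepF rest.length ++ fA rest

lemma presentLoopA_eq (keywords : List String) :
    ∀ index ret, presentLoopA keywords index ret = ret ++ fA (keywords.drop index) := by
  intro index ret
  induction index, ret using presentLoopA.induct keywords with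
  | case1 index ret h ret1 ret2 ih =>
    rw [presentLoopA]
    simp only [dif_pos h]
    show presentLoopA keywords (index+1) ret2 = _
    rw [ih]
    have hdrop : keywords.drop index = keywords[index] :: keywords.drop (index + 1) :=
      List.drop_eq_getElem_cons h
    rw [hdrop]
    have hlen : (keywords.drop (index + 1)).length = keywords.length - (index + 1) :=
      List.length_drop
    simp only [fA, hlen]
    have hsep : sepF (keywords.length - (index + 1)) =
        (if (index : Int) < (keywords.length : Int) - 2 then ", "
         else if (index : Int) < (keywords.length : Int) - 1 then " or " else "") := by
      unfold sepF
      by_cases h2 : (index : Int) < (keywords.length : Int) - 2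
      · rw [if_pos h2, if_pos (by omega)]
      · rw [if_neg h2]
        by_cases h1 : (index : Int) < (keywords.length : Int) - 1
        · rw [if_pos h1, if_neg (by omega), if_pos (by omega)]
        · rw [if_neg h1, if_neg (by omega), if_neg (by omega)]
    rw [hsep]
    simp only [ret2, ret1]
    split_ifs with h2 h1 <;> simp [String.append_assoc]
  | case2 index ret h =>
    rw [presentLoopA]
    simp only [dif_neg h]
    rw [List.drop_eq_nil_of_le (by omega)]
    simp [fA]

-- B's closed shape agrees with fA
lemma fA_eq_alt (keywords : List String) : fA keywords = present_keywords_py_alt keywords := by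
  induction keywords with
  | nil => rfl
  | cons k rest ih =>
    cases rest with
    | nil => simp [fA, sepF, present_keywords_py_alt]
    | cons k2 rest2 =>
      cases rest2 with
      | nil =>
        simp [fA, sepF, present_keywords_py_alt, joinCommaB, String.append_assoc]
      | cons k3 rest3 =>
        -- rest = k2 :: k3 :: rest3 has length ≥ 2
        have hlen : 2 ≤ (k2 :: k3 :: rest3 : List String).length := by simp
        simp only [fA, sepF, if_pos hlen] at *
        rw [ih]
        simp only [present_keywords_py_alt, List.map_cons]
        simp [joinCommaB, String.append_assoc]

-- ===== VERDICT (by name: the statement is the Claim_ definition above) =====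
theorem present_keywords_py_spec : Claim_equal_present_keywords_py := by
  intro keywords _
  show present_keywords_py keywords = present_keywords_py_alt keywords
  rw [present_keywords_py, presentLoopA_eq, List.drop_zero, ← fA_eq_alt]
  simp
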